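-- pv_equiv track=rewrite | github.com/ravi0424/codemind-python | Maximum_and_Minimum.py | find
-- ===== SOURCE A (Python) =====
-- def find(a):
-- 	b=[]
-- 	c,d=0,0
-- 	for i in a:
-- 		c=i
-- 		d=a.count(i)
-- 		if d==c:
-- 			if i in b:
-- 				continue
-- 			else:
-- 				b.append(i)
-- 	return b
-- ===== SOURCE B (Python) =====
-- def find(a):
-- 	cnt = {}
-- 	for i in a:
-- 		cnt[i] = cnt.get(i, 0) + 1
-- 	return [k for k, v in cnt.items() if v == k]
-- ===== Notes on version B (the rewrite author's own statement) =====
-- stated objective: faster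
-- what changed: B builds a frequency dict in one pass and then filters its keys (insertion order = first-occurrence order), eliminating A's per-element a.count rescan and the 'i in b' dedup membership scan.
import Mathlib
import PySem

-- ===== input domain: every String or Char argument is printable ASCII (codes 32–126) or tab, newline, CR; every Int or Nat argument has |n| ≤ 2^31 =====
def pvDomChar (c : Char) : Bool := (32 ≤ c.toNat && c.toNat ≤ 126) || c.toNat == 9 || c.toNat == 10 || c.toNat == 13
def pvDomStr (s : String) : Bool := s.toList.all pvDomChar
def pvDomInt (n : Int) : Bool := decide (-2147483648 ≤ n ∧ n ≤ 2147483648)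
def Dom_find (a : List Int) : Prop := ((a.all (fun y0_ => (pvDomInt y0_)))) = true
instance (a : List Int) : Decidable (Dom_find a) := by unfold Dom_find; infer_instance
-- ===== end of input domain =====

-- B: one-pass frequency dict, then filter its keys (faster: removes A's per-element a.count rescan)
-- A mutates nothing observable; equivalence is about the return value.

-- ===== PORT A =====
def find (a : List Int) : List Int :=
  a.foldl (fun b i =>
    let c : Int := i
    let d : Int := (PySem.List.count a i : Int)
    if d == c then
      (if b.contains i then b else b ++ [i])
    else b) []

-- ===== PORT B =====
def find_alt (a : List Int) : List Int :=
  let cnt : PySem.Dict Int Int :=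
    a.foldl (fun d i => d.insert i (d.getD i 0 + 1)) PySem.Dict.empty
  (cnt.items.filter (fun kv => kv.2 == kv.1)).map (fun kv => kv.1)

-- ===== PRECONDITION & SPEC =====
def Spec_find (a : List Int) (out : List Int) : Prop := out = find_alt a
instance (a : List Int) (out : List Int) : Decidable (Spec_find a out) := by unfold Spec_find; infer_instance

-- ===== CLAIM (what is proved, stated in full; the proofs are below) =====
def Claim_equal_find : Prop := ∀ (a : List Int), Dom_find a → Spec_find a (find a)

-- ===== LEMMAS AND PROOFS =====

theorem pv_filter_foldl_add {α : Type} [BEq α] [LawfulBEq α] (p : α → Bool) :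
    ∀ (l : List α) (s : List α),
      (l.filter p).foldl PySem.Set.add (s.filter p)
        = (l.foldl PySem.Set.add s).filter p := by
  intro l
  induction l with
  | nil => intro s; simp
  | cons i t ih =>
    intro s
    by_cases hp : p i = true
    · have hadd : (PySem.Set.add s i).filter p = PySem.Set.add (s.filter p) i := by
        simp only [PySem.Set.add, PySem.Set.contains]
        by_cases hm : s.contains i = true
        · rw [if_pos hm, if_pos]
          simpa [List.mem_filter, hp] using hm
        · rw [if_neg hm, List.filter_append, if_neg]
          · simp [hp]
          · simp only [List.contains_eq_mem, decide_eq_true_eq] at hm ⊢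
            exact fun h => hm (List.mem_filter.mp h).1
      simp only [List.filter_cons, hp, if_pos, List.foldl_cons]
      rw [← hadd]
      exact ih (PySem.Set.add s i)
    · have hadd : (PySem.Set.add s i).filter p = s.filter p := by
        simp only [PySem.Set.add]
        by_cases hm : PySem.Set.contains s i = true
        · rw [if_pos hm]
        · rw [if_neg hm, List.filter_append]
          simp [hp]
      simp only [List.filter_cons, hp, List.foldl_cons, ← hadd]
      exact ih (PySem.Set.add s i)

theorem pv_ofList_filter {α : Type} [BEq α] [LawfulBEq α] (p : α → Bool) (l : List α) :
    PySem.Set.ofList (l.filter p) = (PySem.Set.ofList l).filter p := by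
  simpa [PySem.Set.ofList, PySem.Set.empty] using pv_filter_foldl_add p l []

-- ===== VERDICT (by name: the statement is the Claim_ definition above) =====
theorem find_spec : Claim_equal_find := by
  unfold Claim_equal_find
  intro a _
  unfold Spec_find find find_alt
  rw [PySem.Dict.foldl_insert_getD_add_one_eq_counter]
  have hB : ((PySem.Dict.counter a).items.filter (fun kv => kv.2 == kv.1)).map
      (fun kv => kv.1)
      = (PySem.Set.ofList a).filter (fun k => ((a.count k : Int) == k)) := by
    rw [PySem.Dict.items_counter, List.filter_map, List.map_map]
    simp only [Function.comp_def]
    exact List.map_id _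
  have hA : a.foldl (fun b i =>
      let c : Int := i
      let d : Int := (PySem.List.count a i : Int)
      if d == c then (if b.contains i then b else b ++ [i]) else b) []
      = PySem.Set.ofList (a.filter (fun k => ((a.count k : Int) == k))) := by
    rw [PySem.Set.ofList, ← List.foldl_filter]
    rfl
  rw [hA, hB, pv_ofList_filter]
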